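-- pv_equiv track=rewrite | github.com/fakerybakery/mobi-test | FileObject.py | asString
-- ===== SOURCE A (Python) =====
-- def asString(integer, size):
--     out = ""
--     for i in range(size):
--         if i > 0:
--             out = " " + out
--         byte = format(integer & 0xFF, "02X")
--         out = byte + out
--         integer >>= 8
--     return out
-- ===== SOURCE B (Python) =====
-- def asString(integer, size):
--     if size <= 0:
--         return ""
--     hexstr = format(integer & ((1 << (8 * size)) - 1), "0{}X".format(2 * size))
--     return " ".join(hexstr[i:i + 2] for i in range(0, len(hexstr), 2))
-- ===== Notes on version B (the rewrite author's own statement) =====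
-- stated objective: faster
-- what changed: B masks the integer once to the low size bytes and formats the whole value in a single zero-padded format() call, then regroups the hex string into space-separated byte pairs, instead of A's per-byte shift-mask-and-string-prepend loop (whose repeated prepends are quadratic in size).
import Mathlib
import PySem

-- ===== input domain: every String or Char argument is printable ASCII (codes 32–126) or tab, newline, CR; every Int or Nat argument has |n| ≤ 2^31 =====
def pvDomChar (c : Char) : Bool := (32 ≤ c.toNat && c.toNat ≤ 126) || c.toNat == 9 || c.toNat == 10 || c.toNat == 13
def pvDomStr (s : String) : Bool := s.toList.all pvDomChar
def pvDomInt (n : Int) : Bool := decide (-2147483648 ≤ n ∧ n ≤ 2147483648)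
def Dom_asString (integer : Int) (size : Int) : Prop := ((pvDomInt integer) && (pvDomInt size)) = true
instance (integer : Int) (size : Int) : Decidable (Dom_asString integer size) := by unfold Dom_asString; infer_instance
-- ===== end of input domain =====

-- B formats the masked integer with one zero-padded format() call and regroups the
-- hex string into space-separated byte pairs, instead of A's per-byte shift/prepend loop.

-- shared helper: one uppercase hex digit
def hexDigit (n : Nat) : Char :=
  ['0','1','2','3','4','5','6','7','8','9','A','B','C','D','E','F'].getD n '0'

-- ===== PORT A =====
-- format(v, "02X") for 0 ≤ v < 256 (exact on that range, which A's mask guarantees)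
def pair02X (v : Nat) : List Char := [hexDigit (v / 16), hexDigit (v % 16)]

def asString (integer : Int) (size : Int) : String :=
  String.mk ((PySem.List.pyRange 0 size 1).foldl
    (fun (st : List Char × Int) i =>
      let out := if 0 < i then ' ' :: st.1 else st.1          -- if i > 0: out = " " + out
      let byte := pair02X ((PySem.Int.band st.2 255).toNat)   -- byte = format(integer & 0xFF, "02X"); the mask is ≥ 0, so toNat is exact
      (byte ++ out, PySem.Int.floordiv st.2 256))             -- integer >>= 8, exact: arithmetic right shift by 8 is floor division by 256
    ([], integer)).1

-- ===== PORT B =====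
-- uppercase hex digits of m, no padding (the core of format(m, 'X') for m : Nat)
def toHexU (m : Nat) : List Char :=
  if m < 16 then [hexDigit m] else toHexU (m / 16) ++ [hexDigit (m % 16)]
decreasing_by exact Nat.div_lt_self (by omega) (by omega)

-- format(m, '0{w}X'): zero-pad toHexU m on the left to width w
def padHex (w : Nat) (m : Nat) : List Char :=
  List.replicate (w - (toHexU m).length) '0' ++ toHexU m

-- ' '.join(hexstr[i:i+2] for i in range(0, len(hexstr), 2)): hand port of the regrouping pass
def chunk2 : List Char → List Char
  | [] => []
  | [a] => [a]
  | a :: b :: rest => if rest = [] then [a, b] else a :: b :: ' ' :: chunk2 rest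

def asString_alt (integer : Int) (size : Int) : String :=
  if size ≤ 0 then "" else
    -- integer & ((1 << (8*size)) - 1); the mask result is ≥ 0, so toNat is exact
    String.mk (chunk2 (padHex (2 * size.toNat)
      ((PySem.Int.band integer ((2 : Int) ^ (8 * size.toNat) - 1)).toNat)))

-- ===== PRECONDITION & SPEC =====
def Spec_asString (integer : Int) (size : Int) (out : String) : Prop := out = asString_alt integer size
instance (integer : Int) (size : Int) (out : String) : Decidable (Spec_asString integer size out) := by unfold Spec_asString; infer_instance

-- ===== CLAIM (what is proved, stated in full; the proofs are below) =====
def Claim_equal_asString : Prop := ∀ (integer : Int) (size : Int), Dom_asString integer size → Spec_asString integer size (asString integer size)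

-- ===== LEMMAS AND PROOFS =====

-- a & (2^w - 1) = a mod 2^w, for every Int a (Python's two's-complement mask)
theorem band_two_pow_sub_one (a : Int) (w : Nat) :
    PySem.Int.band a ((2 : Int) ^ w - 1) = a % ((2 : Int) ^ w) := by
  have hNpos : (0:Nat) < 2 ^ w := by positivity
  have hcast : ((2:Int) ^ w) = ((2 ^ w : Nat) : Int) := by push_cast; rfl
  have hmt : ((2:Int) ^ w - 1).toNat = 2 ^ w - 1 := by omega
  have hmask : (0:Int) ≤ (2:Int) ^ w - 1 := by
    have : (0:Int) < (2:Int) ^ w := by positivity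
    omega
  unfold PySem.Int.band
  by_cases ha : 0 ≤ a
  · rw [if_pos ha, if_pos hmask, hmt, Nat.and_two_pow_sub_one_eq_mod]
    conv_rhs => rw [← Int.toNat_of_nonneg ha, hcast]
    push_cast
    rfl
  · rw [if_neg ha, if_pos hmask, hmt, Nat.and_comm, Nat.and_two_pow_sub_one_eq_mod]
    have hm : ((-a - 1).toNat : Int) = -a - 1 := Int.toNat_of_nonneg (by omega)
    have hmlt : (-a - 1).toNat % 2 ^ w < 2 ^ w := Nat.mod_lt _ hNpos
    have hb : 2 ^ w * ((-a - 1).toNat / 2 ^ w) + (-a - 1).toNat % 2 ^ w = (-a - 1).toNat :=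
      Nat.div_add_mod _ _
    have h1 : a = ((2 ^ w - 1 - (-a - 1).toNat % 2 ^ w : Nat) : Int)
        + ((2 ^ w : Nat) : Int) * (-(((-a - 1).toNat / 2 ^ w : Nat) : Int) - 1) := by
      have hc1 : ((2 ^ w - 1 - (-a - 1).toNat % 2 ^ w : Nat) : Int)
          = ((2 ^ w : Nat) : Int) - 1 - (((-a - 1).toNat % 2 ^ w : Nat) : Int) := by omega
      have hb' : ((2 ^ w : Nat) : Int) * (((-a - 1).toNat / 2 ^ w : Nat) : Int)
          + (((-a - 1).toNat % 2 ^ w : Nat) : Int) = -a - 1 := by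
        rw [← hm]
        exact_mod_cast congrArg (fun n : Nat => (n : Int)) hb
      rw [hc1]
      linear_combination hb'
    rw [hcast]
    conv_rhs => rw [h1, Int.add_mul_emod_self_left]
    rw [Int.emod_eq_of_lt (by omega) (by omega)]

-- iterated floor-shift by one byte
def shiftk : Nat → Int → Int
  | 0, k => k
  | s+1, k => (shiftk s k) / 256

-- the spaced big-endian hex rendering both programs produce
def spaced : Nat → Int → List Char
  | 0, _ => []
  | s+1, k => pair02X ((shiftk s k) % 256).toNat ++ (if s = 0 then [] else ' ' :: spaced s k)

theorem shiftk_succ_comm (s : Nat) (k : Int) : shiftk (s+1) k = shiftk s (k / 256) := by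
  induction s generalizing k with
  | zero => rfl
  | succ s ih => show (shiftk (s+1) k) / 256 = _; rw [ih k]; rfl

theorem band255 (a : Int) : PySem.Int.band a 255 = a % 256 := by
  have h := band_two_pow_sub_one a 8
  norm_num at h
  exact h

-- A's loop computes spaced
theorem foldA (s : Nat) (k : Int) :
    ((PySem.List.pyRange 0 (s : Int) 1).foldl
      (fun (st : List Char × Int) i =>
        (pair02X ((PySem.Int.band st.2 255).toNat) ++ (if 0 < i then ' ' :: st.1 else st.1),
         PySem.Int.floordiv st.2 256))
      ([], k)) = (spaced s k, shiftk s k) := by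
  induction s generalizing k with
  | zero =>
    rw [show ((0 : Nat) : Int) = 0 by rfl, PySem.List.pyRange_one_eq_nil le_rfl]
    rfl
  | succ s ih =>
    rw [show ((s + 1 : Nat) : Int) = (s : Int) + 1 by push_cast; ring,
        PySem.List.pyRange_one_succ_right (by positivity), List.foldl_append, ih]
    simp only [List.foldl]
    rw [band255, PySem.Int.floordiv_eq_ediv_of_pos (by norm_num)]
    by_cases h : s = 0
    · subst h; simp [spaced, shiftk]
    · have h0 : (0 : Int) < (s : Int) := by omega
      simp [spaced, shiftk, h]

-- low-byte-last characterisation of spaced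
theorem spaced_succ_low (s : Nat) (k : Int) :
    spaced (s+1) k
      = (if s = 0 then [] else spaced s (k / 256) ++ [' ']) ++ pair02X ((k % 256).toNat) := by
  induction s generalizing k with
  | zero => simp [spaced, shiftk]
  | succ s ih =>
    have hsh : shiftk (s + 1) k = shiftk s (k / 256) := shiftk_succ_comm s k
    show pair02X ((shiftk (s + 1) k % 256)).toNat ++ (' ' :: spaced (s + 1) k) = _
    rw [ih k, hsh]
    by_cases h : s = 0
    · subst h; simp [spaced, shiftk]
    · simp only [if_neg h, if_neg (Nat.succ_ne_zero s)]
      show _ = (pair02X ((shiftk s (k / 256) % 256)).toNat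
          ++ (if s = 0 then [] else ' ' :: spaced s (k / 256)) ++ [' ']) ++ _
      simp [h]

theorem toHexU_len_le (w : Nat) (m : Nat) (h1 : 1 ≤ w) (h2 : m < 16 ^ w) :
    (toHexU m).length ≤ w := by
  induction w generalizing m with
  | zero => omega
  | succ w ih =>
    rw [toHexU]
    split
    · simp
    · rename_i h16
      by_cases hw : w = 0
      · subst hw; simp at h2; omega
      · have hm : m / 16 < 16 ^ w := by
          rw [Nat.div_lt_iff_lt_mul (by norm_num)]
          calc m < 16 ^ (w + 1) := h2
            _ = 16 ^ w * 16 := by ring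
        have := ih (m / 16) (by omega) hm
        simp only [List.length_append, List.length_cons, List.length_nil]
        omega

theorem padHex_succ (s : Nat) (hs : 1 ≤ s) (m : Nat) :
    padHex (2 * (s+1)) m = padHex (2 * s) (m / 256) ++ pair02X (m % 256) := by
  have ht0 : toHexU 0 = ['0'] := by rw [toHexU]; simp [hexDigit]
  by_cases hm : m < 256
  · have hdiv : m / 256 = 0 := by omega
    rw [hdiv, show m % 256 = m by omega]
    by_cases h16 : m < 16
    · have hx : toHexU m = [hexDigit m] := by rw [toHexU]; simp [h16]
      have hd0 : hexDigit (m / 16) = '0' := by rw [show m / 16 = 0 by omega]; rfl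
      simp only [padHex, hx, ht0, pair02X, hd0, show m % 16 = m by omega,
        List.length_cons, List.length_nil]
      rw [show 2 * (s + 1) - 1 = (2 * s - 1) + 2 by omega, List.replicate_add]
      simp
    · have hx : toHexU m = [hexDigit (m / 16), hexDigit (m % 16)] := by
        conv_lhs => rw [toHexU]
        rw [if_neg (by omega), toHexU, if_pos (by omega)]
        simp
      simp only [padHex, hx, ht0, pair02X, List.length_cons, List.length_nil]
      rw [show 2 * (s + 1) - 2 = (2 * s - 1) + 1 by omega, List.replicate_add]
      simp
  · have hx : toHexU m = toHexU (m / 256) ++ [hexDigit (m % 256 / 16), hexDigit (m % 256 % 16)] := by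
      conv_lhs => rw [toHexU]
      rw [if_neg (by omega), toHexU, if_neg (by omega : ¬ m / 16 < 16)]
      rw [Nat.div_div_eq_div_mul]
      rw [show m / 16 % 16 = m % 256 / 16 by omega, show m % 16 = m % 256 % 16 by omega]
      simp
    simp only [padHex, hx, pair02X, List.length_append, List.length_cons, List.length_nil]
    rw [show 2 * (s + 1) - ((toHexU (m / 256)).length + 2) = 2 * s - (toHexU (m / 256)).length by omega]
    simp

theorem chunk2_append_pair (xs : List Char) (h : xs.length % 2 = 0) (c d : Char) :
    chunk2 (xs ++ [c, d]) = (if xs = [] then [] else chunk2 xs ++ [' ']) ++ [c, d] := by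
  induction xs using chunk2.induct with
  | case1 => simp [chunk2]
  | case2 a => simp at h
  | case3 a b => simp [chunk2]
  | case4 a b rest hne ih =>
    have hr : rest.length % 2 = 0 := by simp at h; omega
    simp only [List.cons_append, chunk2]
    rw [if_neg (by simp), if_neg hne, ih hr, if_neg hne]
    simp

theorem emod_mul_decomp (k c : Int) (hc : 0 < c) :
    k % (256 * c) = 256 * ((k / 256) % c) + k % 256 := by
  have h1 : k / 256 / c = k / (256 * c) := Int.ediv_ediv_of_nonneg (by norm_num)
  rw [Int.emod_def, Int.emod_def, Int.emod_def, ← h1]; ring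

theorem B_eq_spaced (s : Nat) (hs : 1 ≤ s) (k : Int) :
    chunk2 (padHex (2 * s) ((k % ((2:Int) ^ (8 * s))).toNat)) = spaced s k := by
  induction s, hs using Nat.le_induction generalizing k with
  | base =>
    have h256 : ((2:Int) ^ (8 * 1)) = 256 := by norm_num
    rw [h256]
    have hr0 : 0 ≤ k % 256 := Int.emod_nonneg k (by norm_num)
    have hrlt : k % 256 < 256 := Int.emod_lt_of_pos k (by norm_num)
    have hm : (k % 256).toNat < 256 := by omega
    have hsp : spaced 1 k = pair02X (k % 256).toNat := by simp [spaced, shiftk]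
    rw [hsp]
    by_cases h16 : (k % 256).toNat < 16
    · have hx : toHexU (k % 256).toNat = [hexDigit (k % 256).toNat] := by
        rw [toHexU]; simp [h16]
      have hd0 : hexDigit ((k % 256).toNat / 16) = '0' := by
        rw [show (k % 256).toNat / 16 = 0 by omega]; rfl
      simp [padHex, hx, pair02X, hd0, chunk2, show (k % 256).toNat % 16 = (k % 256).toNat by omega]
    · have hx : toHexU (k % 256).toNat
          = [hexDigit ((k % 256).toNat / 16), hexDigit ((k % 256).toNat % 16)] := by
        conv_lhs => rw [toHexU]
        rw [if_neg (by omega), toHexU, if_pos (by omega)]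
        simp
      simp [padHex, hx, pair02X, chunk2]
  | succ s hs ih =>
    have hc : (0:Int) < (2:Int) ^ (8 * s) := by positivity
    have hP : ((2:Int) ^ (8 * (s + 1))) = 256 * (2:Int) ^ (8 * s) := by
      rw [show 8 * (s + 1) = 8 * s + 8 by ring, pow_add]; ring
    have hkey := emod_mul_decomp k ((2:Int) ^ (8 * s)) hc
    have hu0 : 0 ≤ (k / 256) % (2:Int) ^ (8 * s) := Int.emod_nonneg _ (by positivity)
    have hult : (k / 256) % (2:Int) ^ (8 * s) < (2:Int) ^ (8 * s) := Int.emod_lt_of_pos _ hc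
    have hr0 : 0 ≤ k % 256 := Int.emod_nonneg k (by norm_num)
    have hrlt : k % 256 < 256 := Int.emod_lt_of_pos k (by norm_num)
    have hm : (k % (256 * (2:Int) ^ (8 * s))).toNat
        = 256 * ((k / 256) % (2:Int) ^ (8 * s)).toNat + (k % 256).toNat := by omega
    have hmd : (k % (256 * (2:Int) ^ (8 * s))).toNat / 256
        = ((k / 256) % (2:Int) ^ (8 * s)).toNat := by omega
    have hmm : (k % (256 * (2:Int) ^ (8 * s))).toNat % 256 = (k % 256).toNat := by omega
    have hcastpow : ((2:Int) ^ (8 * s)) = ((2 ^ (8 * s) : Nat) : Int) := by push_cast; rfl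
    have h16pow : (16 : Nat) ^ (2 * s) = 2 ^ (8 * s) := by
      rw [show (16:Nat) = 2 ^ 4 by norm_num, ← pow_mul]
      ring_nf
    have hulen : (toHexU ((k / 256) % (2:Int) ^ (8 * s)).toNat).length ≤ 2 * s := by
      apply toHexU_len_le (2 * s) _ (by omega)
      rw [h16pow]
      omega
    have hlen : (padHex (2 * s) ((k / 256) % (2:Int) ^ (8 * s)).toNat).length = 2 * s := by
      simp only [padHex, List.length_append, List.length_replicate]
      omega
    have hne : padHex (2 * s) ((k / 256) % (2:Int) ^ (8 * s)).toNat ≠ [] := by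
      intro hcon
      rw [hcon] at hlen
      simp at hlen
      omega
    rw [hP, padHex_succ s hs, hmd, hmm]
    simp only [pair02X]
    rw [chunk2_append_pair _ (by rw [hlen]; omega), if_neg hne,
        ih (k / 256), spaced_succ_low s k, if_neg (by omega)]
    simp [pair02X]

-- ===== VERDICT (by name: the statement is the Claim_ definition above) =====
theorem asString_spec : Claim_equal_asString := by
  intro integer size _
  unfold Spec_asString
  by_cases hsz : size ≤ 0
  · unfold asString asString_alt
    rw [PySem.List.pyRange_one_eq_nil hsz]
    simp [hsz]
    rfl
  · have hne : ¬ size ≤ 0 := hsz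
    have hs1 : 1 ≤ size.toNat := by omega
    have hcast : ((size.toNat : Int)) = size := by omega
    have hA : asString integer size = String.mk (spaced size.toNat integer) := by
      unfold asString
      conv_lhs => rw [← hcast]
      rw [foldA size.toNat integer]
    have hB : asString_alt integer size
        = String.mk (chunk2 (padHex (2 * size.toNat) ((integer % ((2:Int) ^ (8 * size.toNat))).toNat))) := by
      unfold asString_alt
      rw [if_neg hne, band_two_pow_sub_one]
    rw [hA, hB, B_eq_spaced size.toNat hs1 integer]
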